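-- pv_equiv track=rewrite | github.com/ky1e-cyber/nsu-syspro-hw | Algorithms/pack5/mini10.py | str_radix_sort
-- ===== SOURCE A (Python) =====
-- from typing import List
--
-- CHAR_SET_SIZE = 128
--
-- def str_radix_sort(strings: List[str]) -> List[str]:
--     def chr_counting_sort(ind: int) -> List[str]:
--         count_list = [0] * CHAR_SET_SIZE
--         for s in strings:
--             count_list[ord(s[ind])] += 1
--
--         for i in range(1, CHAR_SET_SIZE):
--             count_list[i] += count_list[i - 1]
--
--         ret = [None] * len(strings)
--
--         for s in reversed(strings):
--             count_list[ord(s[ind])] -= 1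
--             ret[count_list[ord(s[ind])]] = s
--
--         return ret
--
--     for i in reversed(range(len(strings[0]))):
--         strings = chr_counting_sort(i)
--
--     return strings
-- ===== SOURCE B (Python) =====
-- from typing import List
--
-- CHAR_SET_SIZE = 128
--
-- def str_radix_sort(strings: List[str]) -> List[str]:
--     length = len(strings[0])
--
--     def msd(group: List[str], ind: int) -> List[str]:
--         if ind == length:
--             return group
--         buckets = [[] for _ in range(CHAR_SET_SIZE)]
--         for s in group:
--             buckets[ord(s[ind])].append(s)
--         out = []
--         for bucket in buckets:
--             if bucket:
--                 out += msd(bucket, ind + 1)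
--         return out
--
--     return msd(strings, 0)
-- ===== Notes on version B (the rewrite author's own statement) =====
-- stated objective: alternative
-- what changed: Replaces the LSD radix sort (one counting-sort pass with prefix sums and a reversed placement loop over the whole list per character position) by a recursive MSD radix sort that distributes each group into 128 buckets by the current character and concatenates the recursively sorted non-empty buckets.
import Mathlib
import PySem

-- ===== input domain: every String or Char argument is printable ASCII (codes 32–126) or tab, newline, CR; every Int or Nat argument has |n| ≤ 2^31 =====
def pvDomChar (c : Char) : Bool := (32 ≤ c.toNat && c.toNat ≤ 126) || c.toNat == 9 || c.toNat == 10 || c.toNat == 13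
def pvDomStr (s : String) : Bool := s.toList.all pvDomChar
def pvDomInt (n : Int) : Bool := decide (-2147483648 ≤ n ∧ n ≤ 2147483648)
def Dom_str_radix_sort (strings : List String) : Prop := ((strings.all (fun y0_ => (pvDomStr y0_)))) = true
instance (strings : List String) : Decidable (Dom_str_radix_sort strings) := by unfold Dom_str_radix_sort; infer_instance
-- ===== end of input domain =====

-- B replaces A's LSD radix sort (a counting-sort pass per position) by a recursive MSD
-- radix sort into 128 buckets; alternative decomposition, same exact result on Pre_.

-- ===== PORT A =====
-- ord(s[i]); exact whenever 0 ≤ i < len(s) (guaranteed by Pre_; Python raises IndexError otherwise)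
def pvOrdAt (s : String) (i : Nat) : Nat :=
  ((PySem.Str.pyGet? s (Int.ofNat i)).getD ' ').toNat

-- chr_counting_sort(ind) for the current list `strings`, transliterated:
-- count, prefix-sum, then fill `ret` scanning reversed(strings).
def pvCountPass (strings : List String) (ind : Nat) : List String :=
  let count0 : List Int :=
    strings.foldl (fun cl s => cl.set (pvOrdAt s ind) (cl.getD (pvOrdAt s ind) 0 + 1))
      (List.replicate 128 0)
  let count1 : List Int :=
    (PySem.List.pyRange 1 128 1).foldl
      (fun cl i => cl.set i.toNat (cl.getD i.toNat 0 + cl.getD (i.toNat - 1) 0)) count0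
  let fin :=
    strings.reverse.foldl
      (fun (st : List Int × List (Option String)) s =>
        let c := st.1.getD (pvOrdAt s ind) 0 - 1
        (st.1.set (pvOrdAt s ind) c, st.2.set c.toNat (some s)))
      (count1, List.replicate strings.length (none : Option String))
  fin.2.map (fun o => o.getD "")  -- ret holds only placed strings on Pre_ (every None overwritten)

-- for i in reversed(range(len(strings[0]))): strings = chr_counting_sort(i)
def str_radix_sort (strings : List String) : List String :=
  ((PySem.List.pyRange 0 (Int.ofNat strings.headI.toList.length) 1).reverse).foldl
    (fun cur i => pvCountPass cur i.toNat) strings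

-- ===== PORT B =====
-- msd(group, ind): distribute into 128 buckets by ord(s[ind]), recurse on non-empty buckets.
-- Python's base test `ind == length` is written `length ≤ ind` (equivalent on every reachable
-- call, where ind ≤ length) so that the recursion is visibly terminating.
def pvMsd (length : Nat) (ind : Nat) (group : List String) : List String :=
  if length ≤ ind then group
  else
    let buckets : List (List String) :=
      group.foldl (fun bs s => bs.set (pvOrdAt s ind) (bs.getD (pvOrdAt s ind) [] ++ [s]))
        (List.replicate 128 [])
    buckets.foldl (fun out b => if b.isEmpty then out else out ++ pvMsd length (ind + 1) b) []
termination_by length - ind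
decreasing_by omega

def str_radix_sort_alt (strings : List String) : List String :=
  pvMsd strings.headI.toList.length 0 strings

-- ===== PRECONDITION & SPEC =====
-- Pre_: exactly where A returns: a non-empty list whose strings are all at least as long as
-- the first one (otherwise Python raises IndexError; B raises there too).
def Pre_str_radix_sort (strings : List String) : Prop :=
  strings ≠ [] ∧ ∀ s ∈ strings, strings.headI.toList.length ≤ s.toList.length
instance (strings : List String) : Decidable (Pre_str_radix_sort strings) := by
  unfold Pre_str_radix_sort; infer_instance

def pvWitness_str_radix_sort : List String := ["ba", "ab", "aa"]

def Spec_str_radix_sort (strings : List String) (out : List String) : Prop := out = str_radix_sort_alt strings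
instance (strings : List String) (out : List String) : Decidable (Spec_str_radix_sort strings out) := by unfold Spec_str_radix_sort; infer_instance

-- ===== CLAIM (what is proved, stated in full; the proofs are below) =====
def Claim_equal_str_radix_sort : Prop := ∀ (strings : List String), Dom_str_radix_sort strings → Pre_str_radix_sort strings → Spec_str_radix_sort strings (str_radix_sort strings)

-- ===== LEMMAS AND PROOFS =====

-- ---- spec-side vocabulary ----

-- radix key of s read from position i to L-1 (base 128)
def pvKey (L i : Nat) (s : String) : Nat :=
  ((s.toList.drop i).take (L - i)).foldl (fun a c => a * 128 + c.toNat) 0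

-- strings long enough for all positions and with all character codes < 128
def pvGood (L : Nat) (s : String) : Prop :=
  L ≤ s.toList.length ∧ ∀ j, pvOrdAt s j < 128

-- one stable distribution by the character at position i
def pvDist (i : Nat) (l : List String) : List String :=
  ((List.range 128).map (fun v => l.filter (fun s => decide (pvOrdAt s i = v)))).flatten

-- "out is the stable sort of l by key"
def pvSS (key : String → Nat) (l out : List String) : Prop :=
  List.Pairwise (fun a b => key a ≤ key b) out ∧
  ∀ v, out.filter (fun s => decide (key s = v)) = l.filter (fun s => decide (key s = v))

-- functional MSD spec
def pvMsdS (L i : Nat) (l : List String) : List String :=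
  if L ≤ i then l
  else ((List.range 128).map
    (fun v => pvMsdS L (i+1) (l.filter (fun s => decide (pvOrdAt s i = v))))).flatten
termination_by L - i
decreasing_by omega

-- functional LSD spec: state after the passes at positions L-1 … i
def pvLsd (L i : Nat) (l : List String) : List String :=
  if L ≤ i then l else pvDist i (pvLsd L (i+1) l)
termination_by L - i
decreasing_by omega

-- segment overwrite and its sequencing (model of A's placement into ret)
def pvOverwrite {α : Type} (r : List α) (p : Nat) (seg : List α) : List α :=
  r.take p ++ seg ++ r.drop (p + seg.length)

def pvWriteSeq {α : Type} (start : Nat → Nat) (B : Nat → List α) : List Nat → List α → List α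
  | [], r => r
  | v :: vs, r => pvWriteSeq start B vs (pvOverwrite r (start v) (B v))

def pvCnt (i : Nat) (l : List String) (v : Nat) : Nat :=
  l.countP (fun s => decide (pvOrdAt s i = v))

-- number of elements with character below v at position i
def pvCumB (i : Nat) (l : List String) (v : Nat) : Nat :=
  ((List.range v).map (pvCnt i l)).sum

-- ---- small facts about keys ----

theorem pvFold_shift (ds : List Char) (a : Nat) :
    ds.foldl (fun a c => a * 128 + c.toNat) a
      = a * 128 ^ ds.length + ds.foldl (fun a c => a * 128 + c.toNat) 0 := by
  induction ds generalizing a with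
  | nil => simp
  | cons c ds ih =>
    simp only [List.foldl_cons, List.length_cons]
    rw [ih (a * 128 + c.toNat), ih (0 * 128 + c.toNat)]
    ring

theorem pvFold_lt (ds : List Char) (h : ∀ c ∈ ds, c.toNat < 128) :
    ds.foldl (fun a c => a * 128 + c.toNat) 0 < 128 ^ ds.length := by
  induction ds with
  | nil => simp
  | cons c ds ih =>
    simp only [List.foldl_cons, List.length_cons]
    rw [pvFold_shift]
    have h1 : ds.foldl (fun a c => a * 128 + c.toNat) 0 < 128 ^ ds.length :=
      ih (fun c hc => h c (List.mem_cons_of_mem _ hc))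
    have h2 : c.toNat < 128 := h c List.mem_cons_self
    calc (0 * 128 + c.toNat) * 128 ^ ds.length + ds.foldl (fun a c => a * 128 + c.toNat) 0
        < c.toNat * 128 ^ ds.length + 128 ^ ds.length := by
          simp only [Nat.zero_mul, Nat.zero_add]; omega
      _ = (c.toNat + 1) * 128 ^ ds.length := by ring
      _ ≤ 128 * 128 ^ ds.length := Nat.mul_le_mul_right _ (by omega)
      _ = 128 ^ (ds.length + 1) := by ring

theorem pvOrdAt_eq (s : String) (i : Nat) (h : i < s.toList.length) :
    pvOrdAt s i = (s.toList[i]).toNat := by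
  simp [pvOrdAt, List.getElem?_eq_getElem h]

theorem pvKey_stop (L i : Nat) (s : String) (h : L ≤ i) : pvKey L i s = 0 := by
  have : L - i = 0 := by omega
  simp [pvKey, this]

theorem pvKey_decomp (L i : Nat) (s : String) (hi : i < L) (hg : pvGood L s) :
    pvKey L i s = pvOrdAt s i * 128 ^ (L - i - 1) + pvKey L (i+1) s := by
  have hlen : i < s.toList.length := lt_of_lt_of_le hi hg.1
  have hdrop : s.toList.drop i = s.toList[i] :: s.toList.drop (i+1) :=
    (List.getElem_cons_drop hlen).symm
  have hLi : L - i = (L - i - 1) + 1 := by omega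
  have htl : ((s.toList.drop (i+1)).take (L - i - 1)).length = L - i - 1 := by
    rw [List.length_take, List.length_drop]
    have := hg.1; omega
  rw [pvKey, hdrop, hLi, List.take_succ_cons, List.foldl_cons, pvFold_shift, htl,
    pvOrdAt_eq s i hlen]
  have : L - (i + 1) = L - i - 1 := by omega
  rw [pvKey, this, Nat.zero_mul, Nat.zero_add]
  norm_num

theorem pvChar_lt (L : Nat) (s : String) (hg : pvGood L s) :
    ∀ c ∈ s.toList, c.toNat < 128 := by
  intro c hc
  obtain ⟨j, hj, rfl⟩ := List.mem_iff_getElem.1 hc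
  rw [← pvOrdAt_eq s j hj]; exact hg.2 j

theorem pvKey_lt_pow (L i : Nat) (s : String) (hg : pvGood L s) :
    pvKey L i s < 128 ^ (L - i) := by
  have hds : ∀ c ∈ (s.toList.drop i).take (L - i), c.toNat < 128 := by
    intro c hc
    exact pvChar_lt L s hg c (List.mem_of_mem_drop (List.mem_of_mem_take hc))
  calc pvKey L i s < 128 ^ ((s.toList.drop i).take (L - i)).length := pvFold_lt _ hds
    _ ≤ 128 ^ (L - i) := by
        apply Nat.pow_le_pow_right (by omega)
        simp [List.length_take]

-- with c₀ := v / 128^(L-i-1), r₀ := v % 128^(L-i-1):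
theorem pvKey_iff (L i : Nat) (s : String) (v : Nat) (hi : i < L) (hg : pvGood L s) :
    pvKey L i s = v ↔ (pvOrdAt s i = v / 128 ^ (L - i - 1) ∧ pvKey L (i+1) s = v % 128 ^ (L - i - 1)) := by
  have hP : 0 < 128 ^ (L - i - 1) := by positivity
  have hr : pvKey L (i+1) s < 128 ^ (L - i - 1) := by
    have := pvKey_lt_pow L (i+1) s hg
    have he : L - (i+1) = L - i - 1 := by omega
    rwa [he] at this
  rw [pvKey_decomp L i s hi hg]
  constructor
  · rintro rfl
    constructor
    · rw [Nat.mul_comm, Nat.mul_add_div hP, Nat.div_eq_of_lt hr]; omega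
    · rw [Nat.mul_comm, Nat.mul_add_mod, Nat.mod_eq_of_lt hr]
  · rintro ⟨h1, h2⟩
    rw [h1, h2, Nat.mul_comm]
    exact (Nat.div_add_mod v _)

theorem pvKey_lt_of_ord_lt (L i : Nat) (x y : String) (hi : i < L)
    (hx : pvGood L x) (hy : pvGood L y) (h : pvOrdAt x i < pvOrdAt y i) :
    pvKey L i x < pvKey L i y := by
  have hrx : pvKey L (i+1) x < 128 ^ (L - i - 1) := by
    have := pvKey_lt_pow L (i+1) x hx
    have he : L - (i+1) = L - i - 1 := by omega
    rwa [he] at this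
  rw [pvKey_decomp L i x hi hx, pvKey_decomp L i y hi hy]
  calc pvOrdAt x i * 128 ^ (L - i - 1) + pvKey L (i+1) x
      < (pvOrdAt x i + 1) * 128 ^ (L - i - 1) := by
        have : (pvOrdAt x i + 1) * 128 ^ (L - i - 1) = pvOrdAt x i * 128 ^ (L - i - 1) + 128 ^ (L - i - 1) := by ring
        omega
    _ ≤ pvOrdAt y i * 128 ^ (L - i - 1) := Nat.mul_le_mul_right _ (by omega)
    _ ≤ pvOrdAt y i * 128 ^ (L - i - 1) + pvKey L (i+1) y := Nat.le_add_right _ _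

-- ---- stable-sort machinery ----

theorem pvSS_mem {key : String → Nat} {l out : List String} (h : pvSS key l out)
    {x : String} (hx : x ∈ out) : x ∈ l := by
  have h1 : x ∈ out.filter (fun s => decide (key s = key x)) :=
    List.mem_filter.2 ⟨hx, by simp⟩
  rw [h.2 (key x)] at h1
  exact (List.mem_filter.1 h1).1

theorem pvSS_unique {key : String → Nat} {o1 o2 : List String}
    (h1 : List.Pairwise (fun a b => key a ≤ key b) o1)
    (h2 : List.Pairwise (fun a b => key a ≤ key b) o2)
    (hf : ∀ v, o1.filter (fun s => decide (key s = v)) = o2.filter (fun s => decide (key s = v))) :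
    o1 = o2 := by
  induction o1 generalizing o2 with
  | nil =>
    cases o2 with
    | nil => rfl
    | cons b t2 =>
      have := hf (key b)
      simp at this
  | cons a t1 ih =>
    cases o2 with
    | nil =>
      have := hf (key a)
      simp at this
    | cons b t2 =>
      -- a ∈ o2 and b ∈ o1, so the minimal keys agree
      have ha2 : a ∈ b :: t2 := by
        have h1' : a ∈ (a :: t1).filter (fun s => decide (key s = key a)) :=
          List.mem_filter.2 ⟨List.mem_cons_self, by simp⟩
        rw [hf (key a)] at h1'
        exact (List.mem_filter.1 h1').1
      have hb1 : b ∈ a :: t1 := by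
        have h2' : b ∈ (b :: t2).filter (fun s => decide (key s = key b)) :=
          List.mem_filter.2 ⟨List.mem_cons_self, by simp⟩
        rw [← hf (key b)] at h2'
        exact (List.mem_filter.1 h2').1
      have hab : key a = key b := by
        have hle1 : key a ≤ key b := by
          rcases List.mem_cons.1 hb1 with h | h
          · rw [h]
          · exact (List.pairwise_cons.1 h1).1 b h
        have hle2 : key b ≤ key a := by
          rcases List.mem_cons.1 ha2 with h | h
          · rw [h]
          · exact (List.pairwise_cons.1 h2).1 a h
        omega
      have hfa := hf (key a)
      rw [List.filter_cons, List.filter_cons] at hfa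
      simp only [decide_eq_true_eq, hab, if_true] at hfa
      have hhead : a = b := by exact (List.cons_eq_cons.1 hfa).1
      subst hhead
      congr 1
      apply ih (List.pairwise_cons.1 h1).2 (List.pairwise_cons.1 h2).2
      intro v
      have := hf v
      rw [List.filter_cons, List.filter_cons] at this
      by_cases hv : key a = v
      · simp only [hv, decide_true, if_true] at this
        exact (List.cons_eq_cons.1 this).2
      · simpa [hv] using this

theorem pvFlatten_map_range_single {α : Type} (n c : Nat) (g : Nat → List α)
    (h : ∀ u, u < n → u ≠ c → g u = []) (hc : c < n) :
    ((List.range n).map g).flatten = g c := by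
  induction n with
  | zero => omega
  | succ n ih =>
    rw [List.range_succ, List.map_append, List.flatten_append]
    by_cases hcn : c = n
    · subst hcn
      have : ((List.range c).map g).flatten = [] := by
        apply List.flatten_eq_nil_iff.2
        intro l hl
        obtain ⟨u, hu, rfl⟩ := List.mem_map.1 hl
        exact h u (by simpa using Nat.lt_succ_of_lt (List.mem_range.1 hu)) (by
          have := List.mem_range.1 hu; omega)
      simp [this]
    · rw [ih (fun u hu hne => h u (Nat.lt_succ_of_lt hu) hne) (by omega)]
      simp [h n (Nat.lt_succ_self n) (fun he => hcn he.symm)]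

-- the one-step theorem shared by LSD and MSD: distributing by the character at i,
-- with each bucket stably sorted by the tail key, stably sorts by the key from i
theorem pvStep (L i : Nat) (l : List String) (F : Nat → List String) (hi : i < L)
    (hg : ∀ s ∈ l, pvGood L s)
    (hF : ∀ v, v < 128 → pvSS (pvKey L (i+1)) (l.filter (fun s => decide (pvOrdAt s i = v))) (F v)) :
    pvSS (pvKey L i) l (((List.range 128).map F).flatten) := by
  have hmemF : ∀ v, v < 128 → ∀ x ∈ F v, x ∈ l ∧ pvOrdAt x i = v := by
    intro v hv x hx
    have := pvSS_mem (hF v hv) hx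
    have h' := List.mem_filter.1 this
    exact ⟨h'.1, by simpa using h'.2⟩
  constructor
  · -- sorted
    rw [List.pairwise_flatten]
    constructor
    · intro l' hl'
      obtain ⟨v, hv, rfl⟩ := List.mem_map.1 hl'
      have hv' : v < 128 := List.mem_range.1 hv
      refine List.Pairwise.imp_of_mem ?_ (hF v hv').1
      intro x y hx hy hxy
      have hxm := hmemF v hv' x hx
      have hym := hmemF v hv' y hy
      rw [pvKey_decomp L i x hi (hg x hxm.1), pvKey_decomp L i y hi (hg y hym.1),
        hxm.2, hym.2]
      omega
    · rw [List.pairwise_map]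
      refine List.Pairwise.imp_of_mem ?_ List.pairwise_lt_range
      intro v w hv hw hvw x hx y hy
      have hxm := hmemF v (List.mem_range.1 hv) x hx
      have hym := hmemF w (List.mem_range.1 hw) y hy
      exact le_of_lt (pvKey_lt_of_ord_lt L i x y hi (hg x hxm.1) (hg y hym.1)
        (by rw [hxm.2, hym.2]; exact hvw))
  · -- stability
    intro v
    rw [List.filter_flatten, List.map_map]
    set P := 128 ^ (L - i - 1) with hP
    by_cases hbig : v / P < 128
    · have hsingle : ((List.range 128).map
          (List.filter (fun s => decide (pvKey L i s = v)) ∘ F)).flatten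
          = (F (v / P)).filter (fun s => decide (pvKey L i s = v)) := by
        apply pvFlatten_map_range_single
        · intro u hu hune
          simp only [Function.comp_apply]
          rw [List.filter_eq_nil_iff]
          intro x hx hkx
          have hxm := hmemF u hu x hx
          have : pvOrdAt x i = v / P := by
            have := (pvKey_iff L i x v hi (hg x hxm.1)).1 (by simpa using hkx)
            exact this.1
          exact hune (by rw [← hxm.2, this])
        · exact hbig
      rw [hsingle]
      -- chain through the tail filter
      have hmemb : ∀ x ∈ F (v / P), pvGood L x ∧ pvOrdAt x i = v / P := by
        intro x hx
        have := hmemF (v / P) hbig x hx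
        exact ⟨hg x this.1, this.2⟩
      have key_iff : ∀ x : String, pvGood L x → pvOrdAt x i = v / P →
          (decide (pvKey L i x = v) && decide (pvKey L (i+1) x = v % P)) = decide (pvKey L i x = v) := by
        intro x hgx hcx
        by_cases hk : pvKey L i x = v
        · have := (pvKey_iff L i x v hi hgx).1 hk
          simp [hk, hP, this.2]
        · simp [hk]
      calc (F (v / P)).filter (fun s => decide (pvKey L i s = v))
          = ((F (v / P)).filter (fun s => decide (pvKey L (i+1) s = v % P))).filter
              (fun s => decide (pvKey L i s = v)) := by
            rw [List.filter_filter]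
            apply (List.filter_congr ?_).symm
            intro x hx
            exact key_iff x (hmemb x hx).1 (hmemb x hx).2
        _ = ((l.filter (fun s => decide (pvOrdAt s i = v / P))).filter
              (fun s => decide (pvKey L (i+1) s = v % P))).filter
              (fun s => decide (pvKey L i s = v)) := by
            rw [(hF (v / P) hbig).2 (v % P)]
        _ = (l.filter (fun s => decide (pvOrdAt s i = v / P))).filter
              (fun s => decide (pvKey L i s = v)) := by
            rw [List.filter_filter]
            apply List.filter_congr
            intro x hx
            have hx' := List.mem_filter.1 hx
            exact key_iff x (hg x hx'.1) (by simpa using hx'.2)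
        _ = l.filter (fun s => decide (pvKey L i s = v)) := by
            rw [List.filter_filter]
            apply List.filter_congr
            intro x hx
            by_cases hk : pvKey L i x = v
            · have := (pvKey_iff L i x v hi (hg x hx)).1 hk
              simp [hk, hP, this.1]
            · simp [hk]
    · -- v too large for any key: both sides empty
      have hlhs : ((List.range 128).map
          (List.filter (fun s => decide (pvKey L i s = v)) ∘ F)).flatten = [] := by
        apply List.flatten_eq_nil_iff.2
        intro l' hl'
        obtain ⟨u, hu, rfl⟩ := List.mem_map.1 hl'
        simp only [Function.comp_apply]
        rw [List.filter_eq_nil_iff]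
        intro x hx hkx
        have hxm := hmemF u (List.mem_range.1 hu) x hx
        have := (pvKey_iff L i x v hi (hg x hxm.1)).1 (by simpa using hkx)
        have hc : pvOrdAt x i < 128 := (hg x hxm.1).2 i
        rw [hP] at hbig
        rw [this.1] at hc
        exact hbig hc
      rw [hlhs]
      symm
      rw [List.filter_eq_nil_iff]
      intro x hx hkx
      have := (pvKey_iff L i x v hi (hg x hx)).1 (by simpa using hkx)
      have hc : pvOrdAt x i < 128 := (hg x hx).2 i
      rw [hP] at hbig
      rw [this.1] at hc
      exact hbig hc

theorem pvFilter_comm {α : Type} (X : List α) (p q : α → Bool) :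
    (X.filter p).filter q = (X.filter q).filter p := by
  rw [List.filter_filter, List.filter_filter]
  apply List.filter_congr
  intro x _
  exact Bool.and_comm _ _

theorem pvSS_refl (L i : Nat) (l : List String) (h : L ≤ i) : pvSS (pvKey L i) l l := by
  constructor
  · exact List.pairwise_of_forall_sublist (fun {a b} _ => by
      rw [pvKey_stop L i a h, pvKey_stop L i b h])
  · intro v; rfl

theorem pvLsd_ss (L : Nat) (l : List String) (hg : ∀ s ∈ l, pvGood L s) :
    ∀ i, i ≤ L → pvSS (pvKey L i) l (pvLsd L i l) := by
  suffices h : ∀ d i, i + d = L → pvSS (pvKey L i) l (pvLsd L i l) by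
    intro i hi; exact h (L - i) i (by omega)
  intro d
  induction d with
  | zero =>
    intro i hi
    rw [pvLsd, if_pos (by omega)]
    exact pvSS_refl L i l (by omega)
  | succ d ih =>
    intro i hi
    rw [pvLsd, if_neg (by omega)]
    have hm := ih (i+1) (by omega)
    show pvSS (pvKey L i) l
      (((List.range 128).map
        (fun v => (pvLsd L (i+1) l).filter (fun s => decide (pvOrdAt s i = v)))).flatten)
    apply pvStep L i l _ (by omega) hg
    intro v hv
    constructor
    · exact List.Pairwise.filter _ hm.1
    · intro u
      rw [pvFilter_comm, hm.2 u, pvFilter_comm]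

theorem pvMsdS_ss (L : Nat) : ∀ i, i ≤ L → ∀ l : List String, (∀ s ∈ l, pvGood L s) →
    pvSS (pvKey L i) l (pvMsdS L i l) := by
  suffices h : ∀ d i, i + d = L → ∀ l : List String, (∀ s ∈ l, pvGood L s) →
      pvSS (pvKey L i) l (pvMsdS L i l) by
    intro i hi; exact h (L - i) i (by omega)
  intro d
  induction d with
  | zero =>
    intro i hi l hg
    rw [pvMsdS, if_pos (by omega)]
    exact pvSS_refl L i l (by omega)
  | succ d ih =>
    intro i hi l hg
    rw [pvMsdS, if_neg (by omega)]
    apply pvStep L i l _ (by omega) hg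
    intro v hv
    exact ih (i+1) (by omega) _ (fun s hs => hg s (List.mem_filter.1 hs).1)

-- ---- counting sort pass = stable distribution ----

theorem pvOverwrite_nil {α : Type} (r : List α) (p : Nat) : pvOverwrite r p [] = r := by
  simp [pvOverwrite]

theorem pvOverwrite_length {α : Type} (r : List α) (p : Nat) (seg : List α)
    (h : p + seg.length ≤ r.length) : (pvOverwrite r p seg).length = r.length := by
  simp [pvOverwrite, List.length_take, List.length_drop]
  omega

theorem pvOverwrite_set_disjoint {α : Type} (r : List α) (q : Nat) (seg : List α) (p : Nat) (x : α)
    (hp : p < r.length) (h : p + 1 ≤ q ∨ q + seg.length ≤ p) :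
    pvOverwrite (r.set p x) q seg = (pvOverwrite r q seg).set p x := by
  unfold pvOverwrite
  rcases h with hlt | hge
  · have hlen : p < (r.take q).length := by
      rw [List.length_take]; omega
    rw [List.set_append, if_pos (by rw [List.length_append]; omega),
      List.set_append, if_pos hlen, List.take_set, List.drop_set, if_pos (by omega)]
  · have hq : q < r.length := by omega
    have htl : (r.take q).length = q := by rw [List.length_take]; omega
    rw [List.set_append, if_neg (by rw [List.length_append, htl]; omega)]
    rw [List.take_set, List.set_eq_of_length_le (by rw [List.length_take]; omega)]
    rw [List.drop_set, if_neg (by omega)]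
    congr 2
    rw [List.length_append, htl]

theorem pvOverwrite_set_absorb {α : Type} (r : List α) (q : Nat) (seg : List α) (x : α)
    (h : q + seg.length < r.length) :
    pvOverwrite (r.set (q + seg.length) x) q seg = pvOverwrite r q (seg ++ [x]) := by
  unfold pvOverwrite
  rw [List.take_set, List.set_eq_of_length_le (by rw [List.length_take]; omega)]
  rw [List.drop_set, if_neg (by omega), Nat.sub_self]
  rw [List.drop_eq_getElem_cons h, List.set_cons_zero]
  simp [List.append_assoc]
  omega

theorem pvWriteSeq_congr {α : Type} (start : Nat → Nat) (B B' : Nat → List α) :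
    ∀ (vs : List Nat) (r : List α), (∀ v ∈ vs, B v = B' v) →
    pvWriteSeq start B vs r = pvWriteSeq start B' vs r := by
  intro vs
  induction vs with
  | nil => intro r _; rfl
  | cons v vs ih =>
    intro r h
    rw [pvWriteSeq, pvWriteSeq, h v List.mem_cons_self]
    exact ih _ (fun u hu => h u (List.mem_cons_of_mem _ hu))

theorem pvWriteSeq_nil_buckets {α : Type} (start : Nat → Nat) (B : Nat → List α) :
    ∀ (vs : List Nat) (r : List α), (∀ v ∈ vs, B v = []) → pvWriteSeq start B vs r = r := by
  intro vs
  induction vs with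
  | nil => intro r _; rfl
  | cons v vs ih =>
    intro r h
    rw [pvWriteSeq, h v List.mem_cons_self, pvOverwrite_nil]
    exact ih _ (fun u hu => h u (List.mem_cons_of_mem _ hu))

theorem pvWriteSeq_absorb {α : Type} (start : Nat → Nat) (B B' : Nat → List α) (t : Nat) (x : α)
    (hBt : B t = B' t ++ [x]) (hBo : ∀ v, v ≠ t → B v = B' v) :
    ∀ (vs : List Nat) (r : List α), t ∈ vs → vs.Nodup →
    (∀ v ∈ vs, start v + (B v).length ≤ r.length) →
    (∀ v ∈ vs, v ≠ t → start v + (B v).length ≤ start t + (B' t).length ∨ start t + (B t).length ≤ start v) →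
    pvWriteSeq start B' vs (r.set (start t + (B' t).length) x) = pvWriteSeq start B vs r := by
  intro vs
  induction vs with
  | nil => intro r ht; cases ht
  | cons v vs ih =>
    intro r ht hnd hlen hdis
    have hBtlen : (B t).length = (B' t).length + 1 := by rw [hBt]; simp
    by_cases hvt : v = t
    · subst hvt
      rw [pvWriteSeq, pvWriteSeq]
      have hset : pvOverwrite (r.set (start v + (B' v).length) x) (start v) (B' v)
          = pvOverwrite r (start v) (B v) := by
        rw [hBt]
        exact pvOverwrite_set_absorb r (start v) (B' v) x
          (by have := hlen v List.mem_cons_self; omega)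
      rw [hset]
      apply pvWriteSeq_congr
      intro u hu
      have hut : u ≠ v := fun he => (List.nodup_cons.1 hnd).1 (he ▸ hu)
      exact (hBo u hut).symm
    · rw [pvWriteSeq, pvWriteSeq]
      have htvs : t ∈ vs := by
        rcases List.mem_cons.1 ht with h | h
        · exact absurd h.symm hvt
        · exact h
      have hrlen : start t + (B t).length ≤ r.length := hlen t ht
      have hp : start t + (B' t).length < r.length := by omega
      have hvlen : start v + (B v).length ≤ r.length := hlen v List.mem_cons_self
      have hcomm : pvOverwrite (r.set (start t + (B' t).length) x) (start v) (B' v)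
          = (pvOverwrite r (start v) (B v)).set (start t + (B' t).length) x := by
        rw [hBo v hvt]
        apply pvOverwrite_set_disjoint _ _ _ _ _ hp
        rcases hdis v List.mem_cons_self hvt with h | h
        · right; rw [← hBo v hvt]; omega
        · left; omega
      rw [hcomm]
      have hol : (pvOverwrite r (start v) (B v)).length = r.length :=
        pvOverwrite_length _ _ _ hvlen
      apply ih _ htvs (List.nodup_cons.1 hnd).2
      · intro u hu; rw [hol]; exact hlen u (List.mem_cons_of_mem _ hu)
      · intro u hu hut; exact hdis u (List.mem_cons_of_mem _ hu) hut

theorem pvStart_chain (f : Nat → Nat) :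
    ∀ (n a : Nat), (∀ j, j < n → f (a + j) ≤ f (a + j + 1)) → f a ≤ f (a + n) := by
  intro n
  induction n with
  | zero => intro a _; simp
  | succ n ih =>
    intro a h
    calc f a ≤ f (a + n) := ih a (fun j hj => h j (by omega))
      _ ≤ f (a + n + 1) := h n (by omega)

theorem pvWriteSeq_tile {α : Type} (start : Nat → Nat) (B : Nat → List α) :
    ∀ (n a : Nat) (r : List α),
    (∀ j, j < n → start (a + j) + (B (a + j)).length = start (a + j + 1)) →
    start (a + n) ≤ r.length →
    (∀ j, j < n → start (a + j) ≤ start (a + j + 1)) →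
    pvWriteSeq start B (List.range' a n) r
      = r.take (start a) ++ ((List.range' a n).map B).flatten ++ r.drop (start (a + n)) := by
  intro n
  induction n with
  | zero =>
    intro a r _ hle _
    simp [pvWriteSeq, List.take_append_drop]
  | succ n ih =>
    intro a r htile hle hmono
    have hch : start a ≤ start (a + (n+1)) := pvStart_chain start (n+1) a hmono
    have hch1 : start (a+1) ≤ start (a + 1 + n) :=
      pvStart_chain start n (a+1) (fun j hj => by
        have := hmono (j+1) (by omega)
        have he : a + (j+1) = a + 1 + j := by omega
        rwa [he] at this)
    have h0 : start a + (B a).length = start (a+1) := by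
      have := htile 0 (by omega); simpa using this
    have he : a + (n+1) = a + 1 + n := by omega
    have hle' : start (a + 1 + n) ≤ r.length := by rwa [he] at hle
    rw [he] at hch
    have hsa : start a ≤ r.length := by omega
    have hs1 : start (a+1) ≤ r.length := by omega
    rw [List.range'_succ, pvWriteSeq]
    set r1 := pvOverwrite r (start a) (B a) with hr1
    have hX : r1 = (r.take (start a) ++ B a) ++ r.drop (start (a+1)) := by
      rw [hr1]; unfold pvOverwrite
      rw [h0]
    have hXlen : (r.take (start a) ++ B a).length = start (a+1) := by
      rw [List.length_append, List.length_take]; omega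
    have hr1len : r1.length = r.length := pvOverwrite_length _ _ _ (by omega)
    rw [ih (a+1) r1
      (fun j hj => by
        have := htile (j+1) (by omega)
        have he : a + (j+1) = a + 1 + j := by omega
        rwa [he] at this)
      (by rw [hr1len]; exact hle')
      (fun j hj => by
        have := hmono (j+1) (by omega)
        have he : a + (j+1) = a + 1 + j := by omega
        rwa [he] at this)]
    rw [hX]
    have htake : ((r.take (start a) ++ B a) ++ r.drop (start (a+1))).take (start (a+1))
        = r.take (start a) ++ B a := List.take_left' hXlen
    have hdrop : ((r.take (start a) ++ B a) ++ r.drop (start (a+1))).drop (start (a+1+n))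
        = r.drop (start (a+1+n)) := by
      have he : start (a+1+n) = (r.take (start a) ++ B a).length + (start (a+1+n) - start (a+1)) := by
        rw [hXlen]; omega
      conv_lhs => rw [he]
      rw [List.drop_append, List.drop_drop]
      rw [List.drop_eq_nil_of_le (by omega), List.nil_append, Nat.add_sub_cancel_left,
        Nat.add_sub_cancel' hch1]
    rw [htake, hdrop]
    have he2 : a + 1 + n = a + (n + 1) := by omega
    simp only [List.map_cons, List.flatten_cons, he2, List.append_assoc]

theorem pvGetD_set {α : Type} (l : List α) (n m : Nat) (a d : α) (hn : n < l.length) :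
    (l.set n a).getD m d = if n = m then a else l.getD m d := by
  simp only [List.getD_eq_getElem?_getD, List.getElem?_set]
  by_cases h : n = m
  · subst h; simp [hn]
  · simp [h]

-- chained bucket bounds: the end of bucket v lies before the start of any later bucket
theorem pvChain (f c : Nat → Nat) (hc : ∀ v, v + 1 < 128 → f v + c v ≤ f (v + 1)) :
    ∀ d v, v + d + 1 < 128 → f v + c v ≤ f (v + d + 1) := by
  intro d
  induction d with
  | zero => intro v hv; exact hc v hv
  | succ d ih =>
    intro v hv
    calc f v + c v ≤ f (v + d + 1) := ih v (by omega)
      _ ≤ f (v + d + 1) + c (v + d + 1) := Nat.le_add_right _ _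
      _ ≤ f (v + d + 2) := hc _ (by omega)

-- the counting-sort correctness: A's fill loop writes each bucket contiguously
theorem pvFillGen (ind : Nat) : ∀ (m : List String) (cl : List Int) (r : List (Option String))
    (start : Nat → Nat),
    (∀ s ∈ m, pvOrdAt s ind < 128) →
    cl.length = 128 →
    (∀ v, v < 128 → cl.getD v 0 = (start v : Int) + pvCnt ind m v) →
    (∀ v, v + 1 < 128 → start v + pvCnt ind m v ≤ start (v + 1)) →
    (start 127 + pvCnt ind m 127 ≤ r.length) →
    (m.foldl
      (fun (st : List Int × List (Option String)) s =>
        let c := st.1.getD (pvOrdAt s ind) 0 - 1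
        (st.1.set (pvOrdAt s ind) c, st.2.set c.toNat (some s)))
      (cl, r)).2
      = pvWriteSeq start (fun v => (m.reverse.filter (fun s => decide (pvOrdAt s ind = v))).map some)
          (List.range 128) r := by
  intro m
  induction m with
  | nil =>
    intro cl r start _ _ _ _ _
    simp only [List.foldl_nil]
    exact (pvWriteSeq_nil_buckets _ _ _ _ (fun v _ => by simp)).symm
  | cons s m' ih =>
    intro cl r start hkeys hcl hcnt hchain hlast
    set t := pvOrdAt s ind with htdef
    have ht : t < 128 := hkeys s List.mem_cons_self
    have hcnt_cons_t : pvCnt ind (s :: m') t = pvCnt ind m' t + 1 := by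
      simp [pvCnt, ← htdef]
    have hcnt_cons_ne : ∀ v, v ≠ t → pvCnt ind (s :: m') v = pvCnt ind m' v := by
      intro v hv
      simp [pvCnt, ← htdef, Ne.symm hv]
    have hc : cl.getD t 0 - 1 = ((start t + pvCnt ind m' t : Nat) : Int) := by
      rw [hcnt t ht, hcnt_cons_t]; push_cast; ring
    have hcn : (cl.getD t 0 - 1).toNat = start t + pvCnt ind m' t := by
      rw [hc]; exact Int.toNat_natCast _
    -- global bound: every bucket ends within r
    have hupto : ∀ v w, v < w → w < 128 → start v + pvCnt ind (s :: m') v ≤ start w := by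
      intro v w hvw hw
      have h := pvChain start (pvCnt ind (s :: m')) hchain (w - v - 1) v (by omega)
      have he : v + (w - v - 1) + 1 = w := by omega
      rwa [he] at h
    have hglob : ∀ v, v < 128 → start v + pvCnt ind (s :: m') v ≤ r.length := by
      intro v hv
      by_cases hv127 : v = 127
      · subst hv127; exact hlast
      · calc start v + pvCnt ind (s :: m') v ≤ start 127 := hupto v 127 (by omega) (by omega)
          _ ≤ start 127 + pvCnt ind (s :: m') 127 := Nat.le_add_right _ _
          _ ≤ r.length := hlast
    simp only [List.foldl_cons]
    rw [ih (cl.set t (cl.getD t 0 - 1)) (r.set (cl.getD t 0 - 1).toNat (some s)) start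
      (fun u hu => hkeys u (List.mem_cons_of_mem _ hu))
      (by rw [List.length_set]; exact hcl)
      (by
        intro v hv
        rw [pvGetD_set _ _ _ _ _ (by omega)]
        by_cases hvt : t = v
        · subst hvt; rw [if_pos rfl, hc]; push_cast; ring
        · rw [if_neg hvt, hcnt v hv, hcnt_cons_ne v (fun h => hvt h.symm)])
      (by
        intro v hv
        calc start v + pvCnt ind m' v ≤ start v + pvCnt ind (s :: m') v := by
              by_cases hvt : v = t
              · subst hvt; omega
              · rw [hcnt_cons_ne v hvt]
            _ ≤ start (v + 1) := hchain v hv)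
      (by
        rw [List.length_set]
        by_cases h127 : t = 127
        · rw [← h127] at hlast ⊢; omega
        · rw [hcnt_cons_ne 127 (fun h => h127 h.symm)] at hlast
          exact hlast)]
    -- absorb the placement of s into bucket t
    have hrev : (s :: m').reverse = m'.reverse ++ [s] := by simp
    have hBt : ((s :: m').reverse.filter (fun x => decide (pvOrdAt x ind = t))).map some
        = (m'.reverse.filter (fun x => decide (pvOrdAt x ind = t))).map some ++ [some s] := by
      rw [hrev, List.filter_append]
      simp [← htdef]
    have hBo : ∀ v, v ≠ t →
        ((s :: m').reverse.filter (fun x => decide (pvOrdAt x ind = v))).map some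
        = (m'.reverse.filter (fun x => decide (pvOrdAt x ind = v))).map some := by
      intro v hv
      rw [hrev, List.filter_append]
      simp [← htdef, Ne.symm hv]
    have hBlen : ∀ v, ((m'.reverse.filter (fun x => decide (pvOrdAt x ind = v))).map some).length
        = pvCnt ind m' v := by
      intro v
      rw [List.length_map, ← List.countP_eq_length_filter, List.countP_reverse]
      rfl
    have hBlen' : ∀ v, (((s :: m').reverse.filter (fun x => decide (pvOrdAt x ind = v))).map some).length
        = pvCnt ind (s :: m') v := by
      intro v
      rw [List.length_map, ← List.countP_eq_length_filter, List.countP_reverse]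
      rfl
    have habs := pvWriteSeq_absorb start
      (fun v => ((s :: m').reverse.filter (fun x => decide (pvOrdAt x ind = v))).map some)
      (fun v => (m'.reverse.filter (fun x => decide (pvOrdAt x ind = v))).map some)
      t (some s) hBt hBo (List.range 128) r
      (List.mem_range.2 ht) (List.nodup_range)
      (by
        intro v hv
        rw [hBlen' v]
        exact hglob v (List.mem_range.1 hv))
      (by
        intro v hv hvt
        have hv' : v < 128 := List.mem_range.1 hv
        rw [hBlen' v, hBlen t, hBlen' t]
        by_cases hlt : v < t
        · left
          have := hupto v t hlt ht
          omega
        · right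
          exact hupto t v (by omega) hv')
    rw [hcn, ← hBlen t]
    exact habs

theorem pvCount0 (ind : Nat) : ∀ (l : List String) (cl : List Int), (∀ s ∈ l, pvOrdAt s ind < 128) →
    cl.length = 128 →
    (l.foldl (fun cl s => cl.set (pvOrdAt s ind) (cl.getD (pvOrdAt s ind) 0 + 1)) cl).length = 128 ∧
    ∀ v, v < 128 →
      (l.foldl (fun cl s => cl.set (pvOrdAt s ind) (cl.getD (pvOrdAt s ind) 0 + 1)) cl).getD v 0
        = cl.getD v 0 + pvCnt ind l v := by
  intro l
  induction l with
  | nil =>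
    intro cl _ hcl
    exact ⟨hcl, fun v _ => by simp [pvCnt]⟩
  | cons s l ih =>
    intro cl hk hcl
    have ht : pvOrdAt s ind < 128 := hk s List.mem_cons_self
    simp only [List.foldl_cons]
    obtain ⟨hlen, hval⟩ := ih (cl.set (pvOrdAt s ind) (cl.getD (pvOrdAt s ind) 0 + 1))
      (fun u hu => hk u (List.mem_cons_of_mem _ hu)) (by rw [List.length_set]; exact hcl)
    refine ⟨hlen, fun v hv => ?_⟩
    rw [hval v hv, pvGetD_set _ _ _ _ _ (by omega)]
    by_cases hvt : pvOrdAt s ind = v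
    · rw [if_pos hvt]
      simp [pvCnt, hvt]
      ring
    · rw [if_neg hvt]
      simp [pvCnt, hvt]

theorem pvPrefix (cl : List Int) (h : cl.length = 128) :
    ∀ j, j ≤ 127 →
    (((List.range' 1 j).map Int.ofNat).foldl
        (fun cl i => cl.set i.toNat (cl.getD i.toNat 0 + cl.getD (i.toNat - 1) 0)) cl).length = 128 ∧
    ∀ v, v < 128 →
      (((List.range' 1 j).map Int.ofNat).foldl
        (fun cl i => cl.set i.toNat (cl.getD i.toNat 0 + cl.getD (i.toNat - 1) 0)) cl).getD v 0
        = if v ≤ j then ((List.range (v+1)).map (fun u => cl.getD u 0)).sum else cl.getD v 0 := by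
  intro j
  induction j with
  | zero =>
    intro _
    refine ⟨by simpa using h, fun v hv => ?_⟩
    by_cases hv0 : v = 0
    · subst hv0; simp
    · rw [if_neg (by omega)]; simp
  | succ j ih =>
    intro hj
    obtain ⟨hlen, hval⟩ := ih (by omega)
    have hstep : (List.range' 1 (j+1)).map Int.ofNat
        = (List.range' 1 j).map Int.ofNat ++ [Int.ofNat (1 + j)] := by
      rw [List.range'_1_concat, List.map_append]
      rfl
    rw [hstep, List.foldl_append]
    simp only [List.foldl_cons, List.foldl_nil]
    set R := ((List.range' 1 j).map Int.ofNat).foldl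
      (fun cl i => cl.set i.toNat (cl.getD i.toNat 0 + cl.getD (i.toNat - 1) 0)) cl with hR
    have htn : (Int.ofNat (1 + j)).toNat = j + 1 := by simp; omega
    refine ⟨by rw [htn, List.length_set]; exact hlen, fun v hv => ?_⟩
    rw [htn]
    have hj1 : j + 1 - 1 = j := by omega
    rw [hj1, pvGetD_set _ _ _ _ _ (by omega)]
    by_cases hvj : j + 1 = v
    · rw [if_pos hvj, ← hvj]
      rw [hval (j+1) (by omega), if_neg (by omega), hval j (by omega), if_pos (le_refl j)]
      have hsum : ((List.range (j+1+1)).map (fun u => cl.getD u 0)).sum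
          = ((List.range (j+1)).map (fun u => cl.getD u 0)).sum + cl.getD (j+1) 0 := by
        rw [List.range_succ, List.map_append, List.sum_append]; simp
      rw [hsum]
      simp [Int.add_comm]
    · rw [if_neg hvj, hval v hv]
      by_cases hvle : v ≤ j
      · rw [if_pos hvle, if_pos (by omega)]
      · rw [if_neg hvle, if_neg (by omega)]

theorem pvCumB_succ (ind : Nat) (l : List String) (n : Nat) :
    pvCumB ind l (n+1) = pvCumB ind l n + pvCnt ind l n := by
  rw [pvCumB, List.range_succ, List.map_append, List.sum_append]
  simp [pvCumB]

theorem pvCumB_cons (ind : Nat) (s : String) (l : List String) (n : Nat) :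
    pvCumB ind (s :: l) n = pvCumB ind l n + (if pvOrdAt s ind < n then 1 else 0) := by
  induction n with
  | zero => simp [pvCumB]
  | succ n ih =>
    rw [pvCumB_succ, pvCumB_succ, ih]
    have hc : pvCnt ind (s :: l) n = pvCnt ind l n + (if pvOrdAt s ind = n then 1 else 0) := by
      rw [pvCnt, List.countP_cons]
      by_cases h : pvOrdAt s ind = n <;> simp [pvCnt, h]
    rw [hc]
    split_ifs <;> omega

theorem pvSumCnt (ind : Nat) (l : List String) (h : ∀ s ∈ l, pvOrdAt s ind < 128) :
    pvCumB ind l 128 = l.length := by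
  induction l with
  | nil =>
    have hz : pvCnt ind [] = fun _ => 0 := funext (fun v => by simp [pvCnt])
    rw [pvCumB, hz]
    simp
  | cons s l ih =>
    rw [pvCumB_cons, ih (fun u hu => h u (List.mem_cons_of_mem _ hu)),
      if_pos (h s List.mem_cons_self)]
    simp

theorem pvCnt_reverse (ind : Nat) (l : List String) (v : Nat) :
    pvCnt ind l.reverse v = pvCnt ind l v := by
  rw [pvCnt, pvCnt, List.countP_reverse]

set_option maxRecDepth 8192 in
theorem pvPyRange1 : PySem.List.pyRange 1 128 1 = (List.range' 1 127).map Int.ofNat := by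
  decide

set_option maxHeartbeats 1000000 in
theorem pvCountPass_eq_dist (l : List String) (i : Nat) (h : ∀ s ∈ l, pvOrdAt s i < 128) :
    pvCountPass l i = pvDist i l := by
  simp only [pvCountPass, pvPyRange1]
  obtain ⟨h0len, h0val⟩ := pvCount0 i l (List.replicate 128 (0 : Int)) h (by exact List.length_replicate)
  set C0 : List Int := l.foldl (fun cl s => cl.set (pvOrdAt s i) (cl.getD (pvOrdAt s i) 0 + 1))
    (List.replicate 128 (0 : Int)) with hC0
  obtain ⟨h1len, h1val⟩ := pvPrefix C0 h0len 127 (le_refl _)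
  set C1 := ((List.range' 1 127).map Int.ofNat).foldl
    (fun cl i => cl.set i.toNat (cl.getD i.toNat 0 + cl.getD (i.toNat - 1) 0)) C0 with hC1
  have hC0v : ∀ v, v < 128 → C0.getD v 0 = (pvCnt i l v : Int) := by
    intro v hv
    rw [h0val v hv, List.getD_eq_getElem?_getD, List.getElem?_replicate, if_pos hv]
    simp
  have hC1v : ∀ v, v < 128 → C1.getD v 0 = ((pvCumB i l v + pvCnt i l v : Nat) : Int) := by
    intro v hv
    rw [h1val v hv, if_pos (by omega)]
    have hmapc : (List.range (v+1)).map (fun u => C0.getD u 0)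
        = (List.range (v+1)).map (fun u => ((pvCnt i l u : Nat) : Int)) := by
      apply List.map_congr_left
      intro u hu
      exact hC0v u (by have := List.mem_range.1 hu; omega)
    rw [hmapc]
    have : (List.range (v+1)).map (fun u => ((pvCnt i l u : Nat) : Int))
        = ((List.range (v+1)).map (pvCnt i l)).map (fun n : Nat => (n : Int)) := by
      rw [List.map_map]; rfl
    rw [this, ← Nat.cast_list_sum]
    rw [show ((List.range (v+1)).map (pvCnt i l)).sum = pvCumB i l (v+1) from rfl,
      pvCumB_succ]
  have hfill := pvFillGen i l.reverse C1 (List.replicate l.length (none : Option String))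
    (fun v => pvCumB i l v)
    (fun s hs => h s (List.mem_reverse.1 hs))
    h1len
    (by
      intro v hv
      rw [hC1v v hv, pvCnt_reverse]
      push_cast; ring)
    (by
      intro v _
      rw [pvCnt_reverse, ← pvCumB_succ])
    (by
      rw [pvCnt_reverse, ← pvCumB_succ, pvSumCnt i l h, List.length_replicate])
  rw [hfill, List.reverse_reverse]
  rw [List.range_eq_range']
  rw [pvWriteSeq_tile _ _ 128 0 _
    (fun j hj => by
      simp only [Nat.zero_add]
      rw [List.length_map, ← List.countP_eq_length_filter]
      rw [show List.countP (fun s => decide (pvOrdAt s i = j)) l = pvCnt i l j from rfl,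
        ← pvCumB_succ])
    (by simp [pvSumCnt i l h])
    (fun j hj => by rw [pvCumB_succ]; omega)]
  have hz : pvCumB i l 0 = 0 := by simp [pvCumB]
  have htake : (List.replicate l.length (none : Option String)).take (pvCumB i l 0) = [] := by
    rw [hz, List.take_zero]
  have hdrop : (List.replicate l.length (none : Option String)).drop (pvCumB i l (0+128)) = [] := by
    rw [show (0:Nat)+128 = 128 from rfl, pvSumCnt i l h]
    exact List.drop_eq_nil_of_le (by rw [List.length_replicate])
  rw [htake, hdrop, List.nil_append, List.append_nil]
  rw [← List.range_eq_range', List.map_flatten, List.map_map]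
  rw [pvDist]
  refine congrArg List.flatten ?_
  apply List.map_congr_left
  intro v _
  simp [Function.comp, List.map_map]

theorem pvA_eq_lsd (L : Nat) (l : List String) (hg : ∀ s ∈ l, pvGood L s) :
    ∀ d i, i + d = L →
    List.foldl (fun cur j => pvCountPass cur j) l (List.range' i d).reverse = pvLsd L i l := by
  intro d
  induction d with
  | zero =>
    intro i hi
    rw [pvLsd, if_pos (by omega)]
    rfl
  | succ d ih =>
    intro i hi
    rw [List.range'_succ, List.reverse_cons, List.foldl_append]
    simp only [List.foldl_cons, List.foldl_nil]
    rw [ih (i+1) (by omega)]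
    rw [pvCountPass_eq_dist _ i (fun s hs =>
      (hg s (pvSS_mem (pvLsd_ss L l hg (i+1) (by omega)) hs)).2 i)]
    conv_rhs => rw [pvLsd, if_neg (by omega)]

-- ---- port B = MSD spec ----

theorem pvFoldRepNil {α : Type} (f : List String → List α) :
    ∀ (n : Nat) (acc : List α),
    (List.replicate n ([] : List String)).foldl
      (fun out b => if b.isEmpty then out else out ++ f b) acc = acc := by
  intro n
  induction n with
  | zero => intro acc; rfl
  | succ n ih =>
    intro acc
    rw [List.replicate_succ, List.foldl_cons]
    simp only [List.isEmpty_nil, if_true]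
    exact ih acc

theorem pvMsd_nil (L i : Nat) : pvMsd L i [] = [] := by
  rw [pvMsd]
  split
  · rfl
  · simp only [List.foldl_nil]
    exact pvFoldRepNil _ 128 []

theorem pvBuckets (i : Nat) : ∀ (l : List String) (bs : List (List String)),
    (∀ s ∈ l, pvOrdAt s i < 128) → bs.length = 128 →
    (l.foldl (fun bs s => bs.set (pvOrdAt s i) (bs.getD (pvOrdAt s i) [] ++ [s])) bs).length = 128 ∧
    ∀ v, v < 128 →
      (l.foldl (fun bs s => bs.set (pvOrdAt s i) (bs.getD (pvOrdAt s i) [] ++ [s])) bs).getD v []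
        = bs.getD v [] ++ l.filter (fun s => decide (pvOrdAt s i = v)) := by
  intro l
  induction l with
  | nil =>
    intro bs _ hbs
    exact ⟨hbs, fun v _ => by simp⟩
  | cons s l ih =>
    intro bs hk hbs
    have ht : pvOrdAt s i < 128 := hk s List.mem_cons_self
    simp only [List.foldl_cons]
    obtain ⟨hlen, hval⟩ := ih (bs.set (pvOrdAt s i) (bs.getD (pvOrdAt s i) [] ++ [s]))
      (fun u hu => hk u (List.mem_cons_of_mem _ hu)) (by rw [List.length_set]; exact hbs)
    refine ⟨hlen, fun v hv => ?_⟩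
    rw [hval v hv, pvGetD_set _ _ _ _ _ (by omega), List.filter_cons]
    by_cases hvt : pvOrdAt s i = v
    · rw [if_pos hvt, if_pos (by simp [hvt]), hvt]
      simp
    · rw [if_neg hvt, if_neg (by simp [hvt])]

theorem pvFoldGuard {α : Type} (f : List String → List α) (hf : f [] = []) :
    ∀ (bs : List (List String)) (acc : List α),
    bs.foldl (fun out b => if b.isEmpty then out else out ++ f b) acc
      = acc ++ (bs.map f).flatten := by
  intro bs
  induction bs with
  | nil => intro acc; simp
  | cons b bs ih =>
    intro acc
    rw [List.foldl_cons, List.map_cons, List.flatten_cons]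
    by_cases hb : b.isEmpty
    · rw [if_pos hb, ih acc, List.isEmpty_iff.1 hb, hf, List.nil_append]
    · rw [if_neg hb, ih (acc ++ f b), List.append_assoc]

theorem pvMsd_eq_msdS (L : Nat) : ∀ i, i ≤ L → ∀ l : List String, (∀ s ∈ l, pvGood L s) →
    pvMsd L i l = pvMsdS L i l := by
  suffices h : ∀ d i, i + d = L → ∀ l : List String, (∀ s ∈ l, pvGood L s) →
      pvMsd L i l = pvMsdS L i l by
    intro i hi; exact h (L - i) i (by omega)
  intro d
  induction d with
  | zero =>
    intro i hi l hg
    rw [pvMsd, pvMsdS, if_pos (by omega)]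
    simp [show L ≤ i by omega]
  | succ d ih =>
    intro i hi l hg
    rw [pvMsd, pvMsdS, if_neg (by omega), if_neg (by omega)]
    simp only []
    obtain ⟨hblen, hbval⟩ := pvBuckets i l (List.replicate 128 [])
      (fun s hs => (hg s hs).2 i) (by rw [List.length_replicate])
    have hbuckets : (l.foldl (fun bs s => bs.set (pvOrdAt s i) (bs.getD (pvOrdAt s i) [] ++ [s]))
        (List.replicate 128 []))
        = (List.range 128).map (fun v => l.filter (fun s => decide (pvOrdAt s i = v))) := by
      apply List.ext_getElem
      · rw [hblen, List.length_map, List.length_range]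
      · intro n h1 h2
        have hn : n < 128 := by rw [hblen] at h1; exact h1
        rw [List.getElem_map, List.getElem_range]
        rw [← List.getD_eq_getElem _ [] h1, hbval n hn]
        rw [List.getD_eq_getElem?_getD, List.getElem?_replicate, if_pos hn]
        simp
    rw [hbuckets]
    rw [pvFoldGuard (pvMsd L (i+1)) (pvMsd_nil L (i+1)), List.nil_append]
    refine congrArg List.flatten ?_
    rw [List.map_map]
    apply List.map_congr_left
    intro v hv
    simp only [Function.comp_apply]
    exact ih (i+1) (by omega) _ (fun s hs => hg s (List.mem_filter.1 hs).1)

-- ---- assembly ----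

theorem pvGood_of_dom (strings : List String) (hd : Dom_str_radix_sort strings)
    (hp : Pre_str_radix_sort strings) :
    ∀ s ∈ strings, pvGood strings.headI.toList.length s := by
  intro s hs
  refine ⟨hp.2 s hs, ?_⟩
  intro j
  by_cases hj : j < s.toList.length
  · rw [pvOrdAt_eq s j hj]
    have hdom : pvDomStr s = true := by
      have := List.all_eq_true.1 hd s hs
      simpa using this
    have hc := List.all_eq_true.1 hdom (s.toList[j]) (List.getElem_mem hj)
    simp only [pvDomChar, Bool.or_eq_true, Bool.and_eq_true, decide_eq_true_eq, beq_iff_eq] at hc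
    omega
  · have hcast : Int.ofNat j = ((j : Nat) : Int) := rfl
    rw [pvOrdAt, hcast, PySem.Str.pyGet?_natCast, List.getElem?_eq_none (by omega)]
    decide

-- ===== VERDICT (by name: the statement is the Claim_ definition above) =====
theorem str_radix_sort_spec : Claim_equal_str_radix_sort := by
  intro strings hd hp
  unfold Spec_str_radix_sort
  have hg : ∀ s ∈ strings, pvGood strings.headI.toList.length s := pvGood_of_dom strings hd hp
  have hA : str_radix_sort strings = pvLsd strings.headI.toList.length 0 strings := by
    rw [str_radix_sort]
    rw [show (Int.ofNat strings.headI.toList.length) = ((strings.headI.toList.length : Nat) : Int) from rfl,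
      PySem.List.pyRange_zero_natCast]
    rw [← List.map_reverse, List.foldl_map]
    simp only [Int.toNat_natCast]
    rw [List.range_eq_range']
    exact pvA_eq_lsd _ strings hg _ 0 (by omega)
  have hB : str_radix_sort_alt strings = pvMsdS strings.headI.toList.length 0 strings := by
    rw [str_radix_sort_alt]
    exact pvMsd_eq_msdS _ 0 (by omega) strings hg
  rw [hA, hB]
  have hssA := pvLsd_ss _ strings hg 0 (by omega)
  have hssB := pvMsdS_ss _ 0 (by omega) strings hg
  exact pvSS_unique hssA.1 hssB.1 (fun v => by rw [hssA.2 v, hssB.2 v])
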